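-- pv_equiv track=rewrite | github.com/Ananya-246/URL-Shortener | backend/app.py | base62_encode
-- ===== SOURCE A (Python) =====
-- import string
--
-- BASE62 = string.ascii_letters + string.digits #a-zA-Z0-9
--
-- def base62_encode(num):
--     """Encode number to base62 string"""
--     if num==0:
--         return BASE62[0]
--
--     result = []
--     while num:
--         result.append(BASE62[num%62])
--         num//=62
--
--     return ''.join(reversed(result))
-- ===== SOURCE B (Python) =====
-- import string
--
-- BASE62 = string.ascii_letters + string.digits
--
-- def base62_encode(num):
--     """Encode number to base62 string"""
--     p = 1
--     while p * 62 <= num: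
--         p *= 62
--     out = ''
--     while p:
--         out += BASE62[(num // p) % 62]
--         p //= 62
--     return out
-- ===== Notes on version B (the rewrite author's own statement) =====
-- stated objective: alternative
-- what changed: Replaces A's least-significant-first digit loop with list accumulator and reversed/join by a top-down pass: first find the largest power of 62 not exceeding num, then emit digits most-significant-first by dividing by shrinking powers, so no list, no reverse and no zero special case.
import Mathlib
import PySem

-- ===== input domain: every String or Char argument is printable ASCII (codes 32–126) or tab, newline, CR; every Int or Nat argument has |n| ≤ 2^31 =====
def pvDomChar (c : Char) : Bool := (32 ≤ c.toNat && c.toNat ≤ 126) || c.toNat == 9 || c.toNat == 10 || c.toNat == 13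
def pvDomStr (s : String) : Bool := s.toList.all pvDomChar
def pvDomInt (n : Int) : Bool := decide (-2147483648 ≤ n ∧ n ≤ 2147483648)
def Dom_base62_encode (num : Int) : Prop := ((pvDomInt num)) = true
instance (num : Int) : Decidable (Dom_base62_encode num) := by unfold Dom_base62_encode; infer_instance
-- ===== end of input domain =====

-- B encodes top-down: it finds the largest power of 62 ≤ num, then emits digits
-- most-significant-first by dividing by shrinking powers (no list, no reverse,
-- no zero special case); objective: alternative, same cost.


-- ===== PORT A =====
-- BASE62 = string.ascii_letters + string.digits
def pvBase62 : List Char :=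
  "abcdefghijklmnopqrstuvwxyzABCDEFGHIJKLMNOPQRSTUVWXYZ0123456789".toList

-- A's while-loop: result list in append order (least-significant digit first).
-- On num < 0 Python A never returns (num //= 62 stabilises at -1), so those inputs
-- are outside Pre_ below; on num ≥ 0 the loop variable is num.toNat.
def pvLoopA : Nat → List Char
  | n =>
    if n = 0 then []
    else pvBase62.getD (n % 62) ' ' :: pvLoopA (n / 62)
  decreasing_by exact Nat.div_lt_self (Nat.pos_of_ne_zero (by assumption)) (by norm_num)

def base62_encode (num : Int) : String :=
  if num = 0 then String.ofList [pvBase62.getD 0 ' ']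
  else String.ofList (pvLoopA num.toNat).reverse

-- ===== PORT B =====
-- first while-loop of Source B: grow p to the largest power of 62 with p*62 ≤ num
-- (the '0 < p' conjunct is a totality guard only: p starts at 1 and only grows)
def pvPowB (num p : Nat) : Nat :=
  if h : p * 62 ≤ num ∧ 0 < p then pvPowB num (p * 62) else p
  termination_by num - p
  decreasing_by omega

-- second while-loop of Source B: out += BASE62[(num // p) % 62]; p //= 62
def pvDigitsB (num p : Nat) : List Char :=
  if h : p = 0 then []
  else pvBase62.getD ((num / p) % 62) ' ' :: pvDigitsB num (p / 62)
  termination_by p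
  decreasing_by exact Nat.div_lt_self (Nat.pos_of_ne_zero h) (by norm_num)

def base62_encode_alt (num : Int) : String :=
  String.ofList (pvDigitsB num.toNat (pvPowB num.toNat 1))

-- ===== PRECONDITION & SPEC =====
-- Pre_ excludes num < 0, on which Python A loops forever (num //= 62 never reaches 0).
def Pre_base62_encode (num : Int) : Prop := 0 ≤ num
instance (num : Int) : Decidable (Pre_base62_encode num) := by unfold Pre_base62_encode; infer_instance
def pvWitness_base62_encode : Int := (125)

def Spec_base62_encode (num : Int) (out : String) : Prop := out = base62_encode_alt num
instance (num : Int) (out : String) : Decidable (Spec_base62_encode num out) := by unfold Spec_base62_encode; infer_instance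

-- ===== CLAIM (what is proved, stated in full; the proofs are below) =====
def Claim_equal_base62_encode : Prop := ∀ (num : Int), Dom_base62_encode num → Pre_base62_encode num → Spec_base62_encode num (base62_encode num)

-- ===== LEMMAS AND PROOFS =====

def pvC (m : Nat) : Char := pvBase62.getD (m % 62) ' '

theorem pvLoopA_zero : pvLoopA 0 = [] := by rw [pvLoopA]; simp

theorem pvLoopA_unfold (n : Nat) (hn : n ≠ 0) :
    pvLoopA n = pvC n :: pvLoopA (n / 62) := by rw [pvLoopA]; simp [hn, pvC]

theorem pvDigitsB_zero (n : Nat) : pvDigitsB n 0 = [] := by rw [pvDigitsB]; simp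

theorem pvDigitsB_unfold (n p : Nat) (hp : p ≠ 0) :
    pvDigitsB n p = pvC (n / p) :: pvDigitsB n (p / 62) := by
  rw [pvDigitsB]; simp [hp, pvC]

-- peel the LAST digit off pvDigitsB (no bounds needed)
theorem pvDigitsB_pow_succ (k : Nat) : ∀ n : Nat,
    pvDigitsB n (62 ^ (k + 1)) = pvDigitsB (n / 62) (62 ^ k) ++ [pvC n] := by
  induction k with
  | zero =>
    intro n
    norm_num
    rw [pvDigitsB_unfold n 62 (by norm_num)]
    norm_num
    rw [pvDigitsB_unfold n 1 (by norm_num), pvDigitsB_unfold (n / 62) 1 (by norm_num)]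
    norm_num [pvDigitsB_zero]
  | succ k ih =>
    intro n
    have h1 : (62 : Nat) ^ (k + 1 + 1) ≠ 0 := by positivity
    have h2 : (62 : Nat) ^ (k + 1) ≠ 0 := by positivity
    have e1 : (62 : Nat) ^ (k + 1 + 1) / 62 = 62 ^ (k + 1) := by
      rw [pow_succ]; simp
    have e2 : (62 : Nat) ^ (k + 1) / 62 = 62 ^ k := by
      rw [pow_succ]; simp
    have e3 : n / 62 ^ (k + 1 + 1) = n / 62 / 62 ^ (k + 1) := by
      rw [Nat.div_div_eq_div_mul, pow_succ, mul_comm (62 ^ (k+1)) 62, ← pow_succ']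
    rw [pvDigitsB_unfold n _ h1, pvDigitsB_unfold (n / 62) _ h2, e1, e2, ih n, e3]
    simp

-- when 62^k ≤ n < 62^(k+1), B's digit pass is A's loop reversed
theorem pvDigitsB_eq_loopA_reverse (k : Nat) : ∀ n : Nat, 62 ^ k ≤ n → n < 62 ^ (k + 1) →
    pvDigitsB n (62 ^ k) = (pvLoopA n).reverse := by
  induction k with
  | zero =>
    intro n h1 h2
    norm_num at h1 h2 ⊢
    have hn : n ≠ 0 := by omega
    have hd : n / 62 = 0 := Nat.div_eq_of_lt h2
    rw [pvDigitsB_unfold n 1 (by norm_num), pvLoopA_unfold n hn, hd, pvLoopA_zero]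
    norm_num [pvDigitsB_zero]
  | succ k ih =>
    intro n h1 h2
    have hn : n ≠ 0 := by
      have : (0:Nat) < 62 ^ (k+1) := by positivity
      omega
    have hlo : 62 ^ k ≤ n / 62 := by
      rw [Nat.le_div_iff_mul_le (by norm_num)]
      calc 62 ^ k * 62 = 62 ^ (k + 1) := by rw [pow_succ]
        _ ≤ n := h1
    have hhi : n / 62 < 62 ^ (k + 1) := by
      rw [Nat.div_lt_iff_lt_mul (by norm_num)]
      calc n < 62 ^ (k + 1 + 1) := h2
        _ = 62 ^ (k + 1) * 62 := by rw [pow_succ]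
    rw [pvDigitsB_pow_succ, ih (n / 62) hlo hhi, pvLoopA_unfold n hn]
    simp

-- pvPowB finds a power of 62 bracketing n
theorem pvPowB_spec (n : Nat) : ∀ (p : Nat), 0 < p → p ≤ n →
    ∃ j, pvPowB n p = p * 62 ^ j ∧ p * 62 ^ j ≤ n ∧ n < p * 62 ^ (j + 1) := by
  refine pvPowB.induct n
    (fun p => 0 < p → p ≤ n →
      ∃ j, pvPowB n p = p * 62 ^ j ∧ p * 62 ^ j ≤ n ∧ n < p * 62 ^ (j + 1)) ?_ ?_
  · intro x h ih hp hpn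
    obtain ⟨j, hj1, hj2, hj3⟩ := ih (by omega) h.1
    refine ⟨j + 1, ?_, ?_, ?_⟩
    · rw [pvPowB, dif_pos h, hj1, pow_succ]; ring
    · calc x * 62 ^ (j + 1) = x * 62 * 62 ^ j := by ring
        _ ≤ n := hj2
    · calc n < x * 62 * 62 ^ (j + 1) := hj3
        _ = x * 62 ^ (j + 1 + 1) := by ring
  · intro x h hp hpn
    refine ⟨0, ?_, by simpa using hpn, ?_⟩
    · rw [pvPowB, dif_neg h]; ring
    · have hx : ¬ x * 62 ≤ n := fun hc => h ⟨hc, hp⟩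
      calc n < x * 62 := by omega
        _ = x * 62 ^ (0 + 1) := by ring

-- ===== VERDICT (by name: the statement is the Claim_ definition above) =====
theorem base62_encode_spec : Claim_equal_base62_encode := by
  intro num _ hpre
  unfold Pre_base62_encode at hpre
  unfold Spec_base62_encode base62_encode base62_encode_alt
  by_cases h0 : num = 0
  · subst h0
    simp only [Int.toNat_zero]
    rw [show pvPowB 0 1 = 1 from by rw [pvPowB]; norm_num]
    rw [pvDigitsB_unfold 0 1 (by norm_num)]
    norm_num [pvDigitsB_zero, pvC]
  · have hn : num.toNat ≠ 0 := by omega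
    simp only [h0, if_false]
    obtain ⟨j, hj1, hj2, hj3⟩ := pvPowB_spec num.toNat 1 (by norm_num) (by omega)
    rw [hj1]
    simp only [one_mul] at *
    rw [pvDigitsB_eq_loopA_reverse j num.toNat hj2 hj3]
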